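-- pv_equiv track=rewrite | github.com/drszer0/Verselang | verselang.py | _collect_book
-- ===== SOURCE A (Python) =====
-- from typing import Any, Dict, List, Optional, Tuple
--
-- class VerseLangError(Exception):
--     """Raised for VerseLang syntax or runtime errors."""
--
-- def _collect_book(lines: List[str], start: int) -> Tuple[List[str], int, str]:
--     book_name = lines[start][5:].strip()
--     body = []
--     depth = 0
--     i = start + 1
--     while i < len(lines):
--         line = lines[i]
--         if line.startswith("book "):
--             depth += 1
--             body.append(line)
--         elif line == "endbook":
--             if depth == 0:
--                 return body, i + 1, book_name
--             depth -= 1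
--             body.append(line)
--         else:
--             body.append(line)
--         i += 1
--     raise VerseLangError("Unclosed book block.")
-- ===== SOURCE B (Python) =====
-- from typing import List, Tuple
--
-- class VerseLangError(Exception):
--     """Raised for VerseLang syntax or runtime errors."""
--
-- def _collect_book(lines: List[str], start: int) -> Tuple[List[str], int, str]:
--     # Recursive descent: a nested "book " header is handled by a recursive call
--     # that collects the whole inner block; no depth counter is maintained.
--     book_name = lines[start][5:].strip()
--     body = []
--     i = start + 1
--     while i < len(lines):
--         line = lines[i]
--         if line.startswith("book "):
--             inner_body, next_i, _ = _collect_book(lines, i)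
--             body.append(line)
--             body.extend(inner_body)
--             body.append("endbook")
--             i = next_i
--         elif line == "endbook":
--             return body, i + 1, book_name
--         else:
--             body.append(line)
--             i += 1
--     raise VerseLangError("Unclosed book block.")
-- ===== Notes on version B (the rewrite author's own statement) =====
-- stated objective: alternative
-- what changed: A's single flat scan with an explicit depth counter is replaced by recursive descent: a nested 'book ' header triggers a recursive call that collects the whole inner block, and the scan resumes at the index the recursion returns.
import Mathlib
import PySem

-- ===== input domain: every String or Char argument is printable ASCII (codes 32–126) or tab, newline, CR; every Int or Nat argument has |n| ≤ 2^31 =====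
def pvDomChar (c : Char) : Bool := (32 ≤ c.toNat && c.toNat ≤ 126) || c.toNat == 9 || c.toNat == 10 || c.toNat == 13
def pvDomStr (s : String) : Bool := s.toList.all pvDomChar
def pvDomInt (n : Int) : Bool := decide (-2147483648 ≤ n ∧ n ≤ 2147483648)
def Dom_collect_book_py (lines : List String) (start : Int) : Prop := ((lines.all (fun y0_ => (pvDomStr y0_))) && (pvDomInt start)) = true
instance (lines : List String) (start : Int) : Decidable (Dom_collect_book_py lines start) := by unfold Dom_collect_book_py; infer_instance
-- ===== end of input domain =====

-- B replaces A's flat scan with an explicit depth counter by recursive descent into nested book blocks (objective: alternative decomposition, same cost).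
-- A raise of VerseLangError / IndexError in Python is encoded by the helper returning `none`; both top-level ports then return the junk value ([], 0, "").

-- ===== PORT A =====
-- the while loop of A: i cursor, depth counter, accumulated body; `none` = the final raise / IndexError
def loopA (lines : List String) (i : Int) (depth : Int) (body : List String) : Option (List String × Int) :=
  if _h : i < (lines.length : Int) then
    match PySem.List.pyGet? lines i with
    | none => none
    | some line =>
      if PySem.Str.startswith line "book " then
        loopA lines (i+1) (depth+1) (body ++ [line])
      else if line == "endbook" then
        if depth == 0 then some (body, i+1)
        else loopA lines (i+1) (depth-1) (body ++ [line])
      else loopA lines (i+1) depth (body ++ [line])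
  else none
termination_by ((lines.length : Int) - i).toNat
decreasing_by all_goals omega

def collect_book_py (lines : List String) (start : Int) : List String × Int × String :=
  match PySem.List.pyGet? lines start with
  | none => ([], 0, "")
  | some l0 =>
    let book_name := PySem.Str.strip (PySem.Str.slice l0 (some 5) none)
    match loopA lines (start + 1) 0 [] with
    | some (body, ni) => (body, ni, book_name)
    | none => ([], 0, "")

-- ===== PORT B =====
-- recursive descent; fuel only totalizes the nested recursion (4*len+4 is always enough, proved below)
mutual
def collectB : ℕ → List String → Int → Option (List String × Int × String)
  | 0, _, _ => none
  | (f+1), lines, start =>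
    match PySem.List.pyGet? lines start with
    | none => none
    | some l0 =>
      let book_name := PySem.Str.strip (PySem.Str.slice l0 (some 5) none)
      match loopB f lines (start + 1) [] with
      | none => none
      | some (body, ni) => some (body, ni, book_name)

def loopB : ℕ → List String → Int → List String → Option (List String × Int)
  | 0, _, _, _ => none
  | (f+1), lines, i, body =>
    if i < (lines.length : Int) then
      match PySem.List.pyGet? lines i with
      | none => none
      | some line =>
        if PySem.Str.startswith line "book " then
          match collectB f lines i with
          | none => none
          | some (inner, ni, _) => loopB f lines ni (body ++ [line] ++ inner ++ ["endbook"])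
        else if line == "endbook" then some (body, i + 1)
        else loopB f lines (i+1) (body ++ [line])
    else none
end

def collect_book_py_alt (lines : List String) (start : Int) : List String × Int × String :=
  (collectB (4 * lines.length + 4) lines start).getD ([], 0, "")

-- ===== PRECONDITION & SPEC =====
-- Pre_ = exactly the inputs on which A returns (no IndexError on lines[start], and an
-- "endbook" balancing the block exists in the scanned range); outside it A raises.
def Pre_collect_book_py (lines : List String) (start : Int) : Prop :=
  (-(lines.length : Int) ≤ start ∧ start < (lines.length : Int)) ∧
  ∃ j ∈ PySem.List.pyRange (start + 1) (lines.length : Int) 1,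
    PySem.List.pyGet? lines j = some "endbook" ∧
    ((PySem.List.pyRange (start + 1) j 1).countP
        (fun t => PySem.Str.startswith ((PySem.List.pyGet? lines t).getD "") "book ") =
     (PySem.List.pyRange (start + 1) j 1).countP
        (fun t => (PySem.List.pyGet? lines t).getD "" == "endbook"))
instance (lines : List String) (start : Int) : Decidable (Pre_collect_book_py lines start) := by
  unfold Pre_collect_book_py; infer_instance

def pvWitness_collect_book_py : List String × Int := (["book x", "hello", "endbook"], 0)

def Spec_collect_book_py (lines : List String) (start : Int) (out : List String × Int × String) : Prop := out = collect_book_py_alt lines start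
instance (lines : List String) (start : Int) (out : List String × Int × String) : Decidable (Spec_collect_book_py lines start out) := by unfold Spec_collect_book_py; infer_instance

-- ===== CLAIM (what is proved, stated in full; the proofs are below) =====
def Claim_equal_collect_book_py : Prop := ∀ (lines : List String) (start : Int), Dom_collect_book_py lines start → Pre_collect_book_py lines start → Spec_collect_book_py lines start (collect_book_py lines start)

-- ===== LEMMAS AND PROOFS =====

-- unfolding lemmas for A's loop
theorem loopA_stop (lines : List String) (i d : Int) (body : List String)
    (hlt : ¬ i < (lines.length : Int)) : loopA lines i d body = none := by
  rw [loopA]; simp [hlt]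

theorem loopA_oob (lines : List String) (i d : Int) (body : List String)
    (hlt : i < (lines.length : Int)) (hget : PySem.List.pyGet? lines i = none) :
    loopA lines i d body = none := by
  rw [loopA]; simp [hlt, hget]

theorem loopA_header (lines : List String) (i d : Int) (body : List String) (line : String)
    (hlt : i < (lines.length : Int)) (hget : PySem.List.pyGet? lines i = some line)
    (hbook : PySem.Str.startswith line "book " = true) :
    loopA lines i d body = loopA lines (i+1) (d+1) (body ++ [line]) := by
  rw [loopA]; simp only [dif_pos hlt, hget]; rw [if_pos hbook]

theorem loopA_close (lines : List String) (i : Int) (body : List String)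
    (hlt : i < (lines.length : Int)) (hget : PySem.List.pyGet? lines i = some "endbook")
    (hbook : ¬ PySem.Str.startswith "endbook" "book " = true) :
    loopA lines i 0 body = some (body, i + 1) := by
  rw [loopA]; simp only [dif_pos hlt, hget]; rw [if_neg hbook]; simp

theorem loopA_pop (lines : List String) (i d : Int) (body : List String)
    (hlt : i < (lines.length : Int)) (hget : PySem.List.pyGet? lines i = some "endbook")
    (hbook : ¬ PySem.Str.startswith "endbook" "book " = true) (hd : ¬ d = 0) :
    loopA lines i d body = loopA lines (i+1) (d-1) (body ++ ["endbook"]) := by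
  rw [loopA]; simp only [dif_pos hlt, hget]; rw [if_neg hbook]; simp [hd]

theorem loopA_plain (lines : List String) (i d : Int) (body : List String) (line : String)
    (hlt : i < (lines.length : Int)) (hget : PySem.List.pyGet? lines i = some line)
    (hbook : ¬ PySem.Str.startswith line "book " = true) (hend : ¬ line = "endbook") :
    loopA lines i d body = loopA lines (i+1) d (body ++ [line]) := by
  rw [loopA]; simp only [dif_pos hlt, hget]; rw [if_neg hbook]
  have hend' : ¬ (line == "endbook") = true := by simpa using hend
  rw [if_neg hend']

-- A's loop returns a cursor strictly beyond its entry point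
theorem loopA_mono (lines : List String) (i depth : Int) (body : List String)
    (p : List String × Int) (h : loopA lines i depth body = some p) : i < p.2 := by
  induction i, depth, body using loopA.induct lines with
  | case1 i depth body hlt hget => rw [loopA_oob lines i depth body hlt hget] at h; simp at h
  | case2 i depth body hlt line hget hbook ih =>
    rw [loopA_header lines i depth body line hlt hget hbook] at h; have := ih h; omega
  | case3 i depth body hlt line hget hbook hend hd0 =>
    have hline : line = "endbook" := by simpa using hend
    have hd : depth = 0 := by simpa using hd0
    subst hline hd
    rw [loopA_close lines i body hlt hget hbook] at h
    cases h; omega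
  | case4 i depth body hlt line hget hbook hend hd0 ih =>
    have hline : line = "endbook" := by simpa using hend
    have hd : ¬ depth = 0 := by simpa using hd0
    subst hline
    rw [loopA_pop lines i depth body hlt hget hbook hd] at h; have := ih h; omega
  | case5 i depth body hlt line hget hbook hend ih =>
    have hend' : ¬ line = "endbook" := by simpa using hend
    rw [loopA_plain lines i depth body line hlt hget hbook hend'] at h; have := ih h; omega
  | case6 i depth body hlt => rw [loopA_stop lines i depth body hlt] at h; simp at h

-- the body accumulator just prefixes the result
theorem loopA_acc' (lines : List String) (i depth : Int) (body : List String) :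
    ∀ ext : List String, loopA lines i depth (ext ++ body) =
      (loopA lines i depth body).map (fun p => (ext ++ p.1, p.2)) := by
  induction i, depth, body using loopA.induct lines with
  | case1 i depth body hlt hget =>
    intro ext; rw [loopA_oob _ _ _ _ hlt hget, loopA_oob _ _ _ _ hlt hget]; rfl
  | case2 i depth body hlt line hget hbook ih =>
    intro ext
    rw [loopA_header _ _ _ _ line hlt hget hbook, loopA_header _ _ _ body line hlt hget hbook,
        List.append_assoc, ih ext]
  | case3 i depth body hlt line hget hbook hend hd0 =>
    intro ext
    have hline : line = "endbook" := by simpa using hend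
    have hd : depth = 0 := by simpa using hd0
    subst hline hd
    rw [loopA_close _ _ _ hlt hget hbook, loopA_close _ _ _ hlt hget hbook]; rfl
  | case4 i depth body hlt line hget hbook hend hd0 ih =>
    intro ext
    have hline : line = "endbook" := by simpa using hend
    have hd : ¬ depth = 0 := by simpa using hd0
    subst hline
    rw [loopA_pop _ _ _ _ hlt hget hbook hd, loopA_pop _ _ _ body hlt hget hbook hd,
        List.append_assoc, ih ext]
  | case5 i depth body hlt line hget hbook hend ih =>
    intro ext
    have hend' : ¬ line = "endbook" := by simpa using hend
    rw [loopA_plain _ _ _ _ line hlt hget hbook hend', loopA_plain _ _ _ body line hlt hget hbook hend',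
        List.append_assoc, ih ext]
  | case6 i depth body hlt =>
    intro ext; rw [loopA_stop _ _ _ _ hlt, loopA_stop _ _ _ _ hlt]; rfl

theorem loopA_acc (lines : List String) (i depth : Int) (body : List String) :
    loopA lines i depth body = (loopA lines i depth []).map (fun p => (body ++ p.1, p.2)) := by
  have := loopA_acc' lines i depth [] body
  simpa using this

-- scanning at depth d+1 = scan the inner block at depth 0, consume its closing "endbook", continue at depth d
theorem loopA_decomp (lines : List String) (i d : Int) (hd : 0 ≤ d) :
    loopA lines i (d+1) [] =
      (loopA lines i 0 []).bind (fun p =>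
        (loopA lines p.2 d []).map (fun q => (p.1 ++ "endbook" :: q.1, q.2))) := by
  by_cases hlt : i < (lines.length : Int)
  · cases hget : PySem.List.pyGet? lines i with
    | none => rw [loopA_oob _ _ _ _ hlt hget, loopA_oob _ _ _ _ hlt hget]; rfl
    | some line =>
      by_cases hbook : PySem.Str.startswith line "book " = true
      · rw [loopA_header _ _ _ _ line hlt hget hbook, loopA_header _ _ 0 _ line hlt hget hbook]
        rw [loopA_acc lines (i+1) (d+1+1) ([] ++ [line]), loopA_acc lines (i+1) (0+1) ([] ++ [line])]
        have h1 : loopA lines (i+1) (d+1+1) [] =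
            (loopA lines (i+1) 0 []).bind (fun p =>
              (loopA lines p.2 (d+1) []).map (fun q => (p.1 ++ "endbook" :: q.1, q.2))) := by
          have := loopA_decomp lines (i+1) (d+1) (by omega); simpa using this
        have h0 : loopA lines (i+1) (0+1) [] =
            (loopA lines (i+1) 0 []).bind (fun p =>
              (loopA lines p.2 0 []).map (fun q => (p.1 ++ "endbook" :: q.1, q.2))) := by
          have := loopA_decomp lines (i+1) 0 (by omega); simpa using this
        rw [h1, h0]
        cases hin : loopA lines (i+1) 0 [] with
        | none => simp
        | some p =>
          have hm : i + 1 < p.2 := loopA_mono lines (i+1) 0 [] p hin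
          have h2 := loopA_decomp lines p.2 d hd
          rw [Option.bind_some, Option.bind_some, h2]
          cases loopA lines p.2 0 [] with
          | none => simp
          | some p2 =>
            simp only [Option.map_some, Option.bind_some, Option.map_map]
            cases loopA lines p2.2 d [] with
            | none => rfl
            | some q => simp [Function.comp]
      · by_cases hend : line = "endbook"
        · subst hend
          have hdne : ¬ (d + 1) = 0 := by omega
          rw [loopA_pop _ _ _ _ hlt hget hbook hdne, loopA_close _ _ _ hlt hget hbook]
          have : d + 1 - 1 = d := by omega
          rw [this, Option.bind_some, loopA_acc lines (i+1) d ([] ++ ["endbook"])]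
          cases loopA lines (i+1) d [] with
          | none => simp
          | some q => simp
        · rw [loopA_plain _ _ _ _ line hlt hget hbook hend, loopA_plain _ _ 0 _ line hlt hget hbook hend]
          rw [loopA_acc lines (i+1) (d+1) ([] ++ [line]), loopA_acc lines (i+1) 0 ([] ++ [line])]
          rw [loopA_decomp lines (i+1) d hd]
          cases loopA lines (i+1) 0 [] with
          | none => simp
          | some p =>
            simp only [Option.bind_some, Option.map_map]
            congr 1
  · rw [loopA_stop _ _ _ _ hlt, loopA_stop _ _ _ _ hlt]; rfl
termination_by (((lines.length : Int) - i).toNat, d.toNat)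
decreasing_by all_goals omega

-- a "book " header at i at depth 0: the whole inner block, its closing "endbook", then the rest
theorem loopA_zero_header (lines : List String) (i : Int) (line : String)
    (hlt : i < (lines.length : Int)) (hget : PySem.List.pyGet? lines i = some line)
    (hbook : PySem.Str.startswith line "book " = true) :
    loopA lines i 0 [] =
      (loopA lines (i+1) 0 []).bind (fun p =>
        (loopA lines p.2 0 []).map (fun q => (line :: (p.1 ++ "endbook" :: q.1), q.2))) := by
  rw [loopA_header _ _ 0 _ line hlt hget hbook]
  rw [loopA_acc lines (i+1) (0+1) ([] ++ [line])]
  have h0 := loopA_decomp lines (i+1) 0 (by omega)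
  rw [h0]
  cases loopA lines (i+1) 0 [] with
  | none => simp
  | some p =>
    simp only [Option.bind_some, Option.map_map]
    congr 1

-- B's helpers compute A's loop at depth 0, given enough fuel
theorem loopB_eq (lines : List String) (f : ℕ) :
    (∀ (i : Int) (body : List String), 2 * ((lines.length : Int) - i).toNat + 1 ≤ f →
        loopB f lines i body = (loopA lines i 0 []).map (fun p => (body ++ p.1, p.2))) ∧
    (∀ (s : Int), 1 ≤ f → 2 * ((lines.length : Int) - s).toNat ≤ f →
        collectB f lines s =
          match PySem.List.pyGet? lines s with
          | none => none
          | some l0 =>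
            (loopA lines (s + 1) 0 []).map
              (fun p => (p.1, p.2, PySem.Str.strip (PySem.Str.slice l0 (some 5) none)))) := by
  induction f using Nat.strong_induction_on with
  | _ f IH =>
    match f with
    | 0 =>
      refine ⟨fun i body hf => by omega, fun s h1 _ => by omega⟩
    | (f+1) =>
      constructor
      · intro i body hf
        by_cases hlt : i < (lines.length : Int)
        · cases hget : PySem.List.pyGet? lines i with
          | none => rw [loopA_oob _ _ _ _ hlt hget]; simp [loopB, hlt, hget]
          | some line =>
            by_cases hbook : PySem.Str.startswith line "book " = true
            · have hC := (IH f (by omega)).2 i (by omega) (by omega)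
              rw [hget] at hC
              simp only [loopB, if_pos hlt, hget, hbook, if_true, hC]
              rw [loopA_zero_header lines i line hlt hget hbook]
              cases hin : loopA lines (i+1) 0 [] with
              | none => simp
              | some p =>
                have hm : i + 1 < p.2 := loopA_mono lines (i+1) 0 [] p hin
                have hL := (IH f (by omega)).1 p.2
                  (body ++ [line] ++ p.1 ++ ["endbook"]) (by omega)
                simp only [Option.map_some, Option.bind_some, hL]
                cases loopA lines p.2 0 [] with
                | none => simp
                | some q => simp
            · by_cases hend : line = "endbook"
              · subst hend
                rw [loopA_close _ _ _ hlt hget hbook]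
                simp only [loopB, if_pos hlt, hget]
                rw [if_neg hbook]
                simp
              · have hL := (IH f (by omega)).1 (i+1) (body ++ [line]) (by omega)
                rw [loopA_plain _ _ 0 _ line hlt hget hbook hend,
                    loopA_acc lines (i+1) 0 ([] ++ [line])]
                simp only [loopB, if_pos hlt, hget, hbook, hL]
                have : ¬ (line == "endbook") = true := by simpa using hend
                simp only [this]
                cases loopA lines (i+1) 0 [] with
                | none => simp
                | some p => simp
        · rw [loopA_stop _ _ _ _ hlt]; simp [loopB, hlt]
      · intro s _ hf
        cases hget : PySem.List.pyGet? lines s with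
        | none => simp [collectB, hget]
        | some l0 =>
          have hrange : -(lines.length : Int) ≤ s ∧ s < lines.length := by
            by_contra hc
            have hnone : PySem.List.pyGet? lines s = none := by
              rw [PySem.List.pyGet?_eq_none_iff]
              simp only [PySem.Raise.InRange]; omega
            simp [hnone] at hget
          have hL := (IH f (by omega)).1 (s+1) [] (by omega)
          simp only [collectB, hget, hL]
          cases loopA lines (s+1) 0 [] with
          | none => simp
          | some p => simp

-- the two ports agree on every input (a raise is the junk value ([],0,"") on both sides)
theorem ports_agree (lines : List String) (start : Int) :
    collect_book_py lines start = collect_book_py_alt lines start := by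
  unfold collect_book_py collect_book_py_alt
  cases hget : PySem.List.pyGet? lines start with
  | none =>
    show _ = (collectB (4 * lines.length + 3 + 1) lines start).getD ([], 0, "")
    simp [collectB, hget]
  | some l0 =>
    have hrange : -(lines.length : Int) ≤ start ∧ start < lines.length := by
      by_contra hc
      have hnone : PySem.List.pyGet? lines start = none := by
        rw [PySem.List.pyGet?_eq_none_iff]
        simp only [PySem.Raise.InRange]; omega
      simp [hnone] at hget
    have hC := (loopB_eq lines (4 * lines.length + 4)).2 start (by omega) (by omega)
    rw [hC, hget]
    cases loopA lines (start+1) 0 [] with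
    | none => simp
    | some p => simp

-- ===== VERDICT (by name: the statement is the Claim_ definition above) =====
theorem collect_book_py_spec : Claim_equal_collect_book_py := by
  intro lines start _ _
  unfold Spec_collect_book_py
  exact ports_agree lines start
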